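-- pv_equiv track=rewrite | github.com/bestokes/hassocks-departure-board | app.py | group_by_platform
-- ===== SOURCE A (Python) =====
-- def group_by_platform(services):
--     """Group services by platform and limit to 5 per platform"""
--     platform_1 = []
--     platform_2 = []
--     no_platform = []
--
--     for service in services:
--         platform = service['platform']
--         if platform == '1':
--             platform_1.append(service)
--         elif platform == '2':
--             platform_2.append(service)
--         else:
--             no_platform.append(service)
--
--     # Sort by scheduled departure time
--     platform_1.sort(key=lambda x: x['std'])
--     platform_2.sort(key=lambda x: x['std'])
--     no_platform.sort(key=lambda x: x['std'])
--
--     # Limit to 5 services per platform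
--     platform_1 = platform_1[:5]
--     platform_2 = platform_2[:5]
--
--     return platform_1, platform_2, no_platform
-- ===== SOURCE B (Python) =====
-- def group_by_platform(services):
--     """Group services by platform and limit to 5 per platform"""
--     # One global stable sort by 'std', then a single partition pass:
--     # stability makes each bucket come out sorted exactly as A's per-bucket sorts.
--     ordered = sorted(services, key=lambda x: x['std'])
--     platform_1 = []
--     platform_2 = []
--     no_platform = []
--     for service in ordered:
--         platform = service['platform']
--         if platform == '1':
--             platform_1.append(service)
--         elif platform == '2':
--             platform_2.append(service)
--         else:
--             no_platform.append(service)
--     return platform_1[:5], platform_2[:5], no_platform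
-- ===== Notes on version B (the rewrite author's own statement) =====
-- stated objective: alternative
-- what changed: Replaces A's partition-then-three-sorts with one global stable sort followed by a single partition pass; stability of Python's sort makes each bucket identical to A's per-bucket sort.
import Mathlib
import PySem

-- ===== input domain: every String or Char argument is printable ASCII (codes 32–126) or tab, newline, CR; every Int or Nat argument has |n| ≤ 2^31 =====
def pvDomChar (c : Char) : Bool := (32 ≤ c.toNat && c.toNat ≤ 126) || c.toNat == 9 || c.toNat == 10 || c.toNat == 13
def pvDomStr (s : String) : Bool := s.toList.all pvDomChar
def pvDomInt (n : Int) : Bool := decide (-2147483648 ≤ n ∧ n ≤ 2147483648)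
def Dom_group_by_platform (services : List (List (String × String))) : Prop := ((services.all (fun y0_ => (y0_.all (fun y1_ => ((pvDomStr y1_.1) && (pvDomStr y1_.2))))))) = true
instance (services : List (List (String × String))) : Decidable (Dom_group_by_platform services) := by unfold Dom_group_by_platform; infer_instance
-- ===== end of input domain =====

-- B replaces A's partition-then-three-sorts by one global stable sort followed by a single
-- partition pass (stability gives the same buckets); same asymptotic cost, different pass structure.


-- service[k] (dict access; total helper, used only under Pre_ which guarantees the key is present)
def pvItem (s : List (String × String)) (k : String) : String :=
  PySem.Dict.getD (PySem.Dict.ofList s) k ""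

-- the partition step shared by both Pythons' for-loops (A runs it over `services`, B over `ordered`)
def pvStep (acc : (List (List (String × String))) × (List (List (String × String))) × (List (List (String × String))))
    (service : List (String × String)) :
    (List (List (String × String))) × (List (List (String × String))) × (List (List (String × String))) :=
  let platform := pvItem service "platform"
  if platform = "1" then (acc.1 ++ [service], acc.2.1, acc.2.2)
  else if platform = "2" then (acc.1, acc.2.1 ++ [service], acc.2.2)
  else (acc.1, acc.2.1, acc.2.2 ++ [service])

-- ===== PORT A =====
def group_by_platform (services : List (List (String × String))) : (List (List (String × String))) × (List (List (String × String))) × (List (List (String × String))) :=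
  let acc := services.foldl pvStep ([], [], [])
  let platform_1 := PySem.List.sorted acc.1 (fun x => pvItem x "std")
  let platform_2 := PySem.List.sorted acc.2.1 (fun x => pvItem x "std")
  let no_platform := PySem.List.sorted acc.2.2 (fun x => pvItem x "std")
  (platform_1.take 5, platform_2.take 5, no_platform)   -- xs[:5] on a list of known sign = take 5

-- ===== PORT B =====
def group_by_platform_alt (services : List (List (String × String))) : (List (List (String × String))) × (List (List (String × String))) × (List (List (String × String))) :=
  let ordered := PySem.List.sorted services (fun x => pvItem x "std")
  let acc := ordered.foldl pvStep ([], [], [])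
  (acc.1.take 5, acc.2.1.take 5, acc.2.2)

-- ===== PRECONDITION & SPEC =====
-- Pre_ excludes exactly the services lacking a 'platform' or 'std' key, where both Pythons raise KeyError.
def Pre_group_by_platform (services : List (List (String × String))) : Prop :=
  ∀ s ∈ services, "platform" ∈ s.map Prod.fst ∧ "std" ∈ s.map Prod.fst
instance (services : List (List (String × String))) : Decidable (Pre_group_by_platform services) := by unfold Pre_group_by_platform; infer_instance

def pvWitness_group_by_platform : (List (List (String × String))) :=
  [[("platform", "1"), ("std", "10:00")], [("platform", ""), ("std", "09:30")]]

def Spec_group_by_platform (services : List (List (String × String))) (out : (List (List (String × String))) × (List (List (String × String))) × (List (List (String × String)))) : Prop := out = group_by_platform_alt services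
instance (services : List (List (String × String))) (out : (List (List (String × String))) × (List (List (String × String))) × (List (List (String × String)))) : Decidable (Spec_group_by_platform services out) := by unfold Spec_group_by_platform; infer_instance

-- ===== CLAIM (what is proved, stated in full; the proofs are below) =====
def Claim_equal_group_by_platform : Prop := ∀ (services : List (List (String × String))), Dom_group_by_platform services → Pre_group_by_platform services → Spec_group_by_platform services (group_by_platform services)

-- ===== LEMMAS AND PROOFS =====

-- The partition fold is the three filters, appended to the accumulator.
lemma foldl_pvStep (xs : List (List (String × String)))
    (a b c : List (List (String × String))) :
    xs.foldl pvStep (a, b, c) =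
      (a ++ xs.filter (fun s => pvItem s "platform" = "1"),
       b ++ xs.filter (fun s => pvItem s "platform" = "2"),
       c ++ xs.filter (fun s => pvItem s "platform" ≠ "1" ∧ pvItem s "platform" ≠ "2")) := by
  induction xs generalizing a b c with
  | nil => simp
  | cons x xs ih =>
    simp only [List.foldl_cons, List.filter_cons, pvStep]
    by_cases h1 : pvItem x "platform" = "1"
    · simp [h1, ih]
    · by_cases h2 : pvItem x "platform" = "2"
      · simp [h2, ih]
      · simp [h1, h2, ih]

-- inserting an element every list element compares after puts it at the head
lemma insertBy_head {α : Type} (before : α → α → Bool) (x : α) (l : List α)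
    (h : ∀ z ∈ l, before x z = true) :
    PySem.List.insertBy before x l = x :: l := by
  cases l with
  | nil => rfl
  | cons y ys => simp [PySem.List.insertBy, h y (by simp)]

-- insertBy preserves key-sortedness
lemma insertBy_pairwise {α : Type} (k : α → String) (x : α) (ys : List α)
    (h : ys.Pairwise (fun a b => k a ≤ k b)) :
    (PySem.List.insertBy (fun a b => decide (k a < k b)) x ys).Pairwise (fun a b => k a ≤ k b) := by
  induction ys with
  | nil => simp [PySem.List.insertBy]
  | cons y ys ih =>
    rcases List.pairwise_cons.mp h with ⟨hy, hys⟩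
    by_cases hxy : k x < k y
    · rw [insertBy_head]
      · refine List.pairwise_cons.mpr ⟨?_, h⟩
        intro z hz
        rcases List.mem_cons.mp hz with hz | hz
        · exact hz ▸ le_of_lt hxy
        · exact le_of_lt (lt_of_lt_of_le hxy (hy z hz))
      · intro z hz
        rcases List.mem_cons.mp hz with hz | hz
        · exact hz ▸ decide_eq_true hxy
        · exact decide_eq_true (lt_of_lt_of_le hxy (hy z hz))
    · have hstep : PySem.List.insertBy (fun a b => decide (k a < k b)) x (y :: ys)
          = y :: PySem.List.insertBy (fun a b => decide (k a < k b)) x ys := by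
        simp only [PySem.List.insertBy, decide_eq_true_eq, if_neg hxy]
      rw [hstep]
      refine List.pairwise_cons.mpr ⟨?_, ih hys⟩
      intro z hz
      rcases (PySem.List.mem_insertBy _ x z ys).mp hz with hz | hz
      · exact hz ▸ le_of_not_gt hxy
      · exact hy z hz

-- filtering commutes with stable insertion into a sorted list
lemma filter_insertBy {α : Type} (k : α → String) (p : α → Bool) (x : α) (ys : List α)
    (h : ys.Pairwise (fun a b => k a ≤ k b)) :
    (PySem.List.insertBy (fun a b => decide (k a < k b)) x ys).filter p =
      if p x then PySem.List.insertBy (fun a b => decide (k a < k b)) x (ys.filter p)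
      else ys.filter p := by
  induction ys with
  | nil => cases hpx : p x <;> simp [PySem.List.insertBy, hpx]
  | cons y ys ih =>
    rcases List.pairwise_cons.mp h with ⟨hy, hys⟩
    by_cases hxy : k x < k y
    · have hstep : PySem.List.insertBy (fun a b => decide (k a < k b)) x (y :: ys)
          = x :: y :: ys := by
        simp only [PySem.List.insertBy, decide_eq_true_eq, if_pos hxy]
      have hhead : PySem.List.insertBy (fun a b => decide (k a < k b)) x ((y :: ys).filter p)
          = x :: (y :: ys).filter p := by
        apply insertBy_head
        intro z hz
        rcases List.mem_cons.mp (List.mem_of_mem_filter hz) with hz' | hz'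
        · exact hz' ▸ decide_eq_true hxy
        · exact decide_eq_true (lt_of_lt_of_le hxy (hy z hz'))
      rw [hstep]
      by_cases hpx : p x = true
      · rw [if_pos hpx, hhead]
        simp [List.filter_cons, hpx]
      · rw [if_neg hpx]
        simp [List.filter_cons, hpx]
    · have hstep : PySem.List.insertBy (fun a b => decide (k a < k b)) x (y :: ys)
          = y :: PySem.List.insertBy (fun a b => decide (k a < k b)) x ys := by
        simp only [PySem.List.insertBy, decide_eq_true_eq, if_neg hxy]
      rw [hstep]
      have hih := ih hys
      by_cases hpx : p x = true
      · rw [if_pos hpx] at hih ⊢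
        rw [List.filter_cons, List.filter_cons]
        by_cases hpy : p y = true
        · have hstep2 : PySem.List.insertBy (fun a b => decide (k a < k b)) x (y :: ys.filter p)
              = y :: PySem.List.insertBy (fun a b => decide (k a < k b)) x (ys.filter p) := by
            simp only [PySem.List.insertBy, decide_eq_true_eq, if_neg hxy]
          rw [if_pos hpy, if_pos hpy, hstep2, hih]
        · rw [if_neg hpy, if_neg hpy, hih]
      · rw [if_neg hpx] at hih ⊢
        rw [List.filter_cons, List.filter_cons]
        by_cases hpy : p y = true
        · rw [if_pos hpy, if_pos hpy, hih]
        · rw [if_neg hpy, if_neg hpy, hih]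
-- filtering commutes with the whole insertion-sort fold
lemma filter_foldl_insertBy {α : Type} (k : α → String) (p : α → Bool)
    (xs acc : List α) (hacc : acc.Pairwise (fun a b => k a ≤ k b)) :
    (xs.foldl (fun acc x => PySem.List.insertBy (fun a b => decide (k a < k b)) x acc) acc).filter p
      = (xs.filter p).foldl (fun acc x => PySem.List.insertBy (fun a b => decide (k a < k b)) x acc) (acc.filter p) := by
  induction xs generalizing acc with
  | nil => simp
  | cons x xs ih =>
    simp only [List.foldl_cons, List.filter_cons]
    rw [ih _ (insertBy_pairwise k x acc hacc), filter_insertBy k p x acc hacc]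
    cases hpx : p x
    · simp
    · simp

-- sorted(filter) = filter(sorted) for a stable sort
lemma filter_sorted {α : Type} (k : α → String) (p : α → Bool) (xs : List α) :
    (PySem.List.sorted xs k).filter p = PySem.List.sorted (xs.filter p) k := by
  rw [PySem.List.sorted_eq_foldl_insertBy, PySem.List.sorted_eq_foldl_insertBy]
  simpa using filter_foldl_insertBy k p xs [] (by simp)

-- ===== VERDICT (by name: the statement is the Claim_ definition above) =====
theorem group_by_platform_spec : Claim_equal_group_by_platform := by
  intro services _ _
  show group_by_platform services = group_by_platform_alt services
  simp only [group_by_platform, group_by_platform_alt, foldl_pvStep, List.nil_append,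
    ← filter_sorted]
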